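-- pv_equiv track=rewrite | github.com/selfreferencing/erdos-86-lean | verify_gap_fast.py | find_esc_fast
-- ===== SOURCE A (Python) =====
-- def verify(n, x, y, z):
--     """Check 4xyz = n(yz + xz + xy)"""
--     return 4 * x * y * z == n * (y * z + x * z + x * y)
--
-- def find_esc_fast(n):
--     """
--     Fast ESC search using multiple strategies.
--     """
--     # Strategy 1: Type I - one of x, y, z divides n
--     # If x divides n, then 4/n - 1/x = (4x-n)/(nx) must equal 1/y + 1/z
--     for x in range(1, n + 1):
--         if n % x == 0:
--             # 4/n = 1/x + 1/y + 1/z where x | n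
--             # Remaining: (4x - n)/(nx) = 1/y + 1/z
--             num = 4 * x - n
--             if num <= 0:
--                 continue
--             denom = n * x
--             # 1/y + 1/z = num/denom
--             # y*z = denom*(y+z)/num
--             # For each y, check if z is integer
--             for y in range(x, 4 * n):
--                 # z = denom*y / (num*y - denom) when this is positive integer
--                 d = num * y - denom
--                 if d > 0 and (denom * y) % d == 0:
--                     z = (denom * y) // d
--                     if z >= y and verify(n, x, y, z):
--                         return (x, y, z)
--
--     # Strategy 2: Bradford Type II - systematic small x search
--     for x in range(n // 4 + 1, n + 1):
--         num = 4 * x - n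
--         if num <= 0:
--             continue
--         for y in range(x, min(10 * n, x + 10000)):
--             d = num * y - n * x
--             if d > 0 and (n * x * y) % d == 0:
--                 z = (n * x * y) // d
--                 if z >= y and verify(n, x, y, z):
--                     return (x, y, z)
--
--     return None
-- ===== SOURCE B (Python) =====
-- def find_esc_fast(n):
--     """
--     ESC search by divisor enumeration: for each x the remaining equation num/denom = 1/y + 1/z
--     (num = 4*x - n, denom = n*x) is solved in closed form through the identity
--     (num*y - denom) * (num*z - denom) = denom**2: instead of scanning y we
--     enumerate the divisors a of denom**2 (as products of two divisors of
--     denom = n*x, themselves products of a divisor of n and a divisor of x),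
--     keep those that give integers y, z in the searched window, and take the
--     smallest, which is exactly the smallest y a scan would have found.
--     """
--     divs_n = _divisors(n)
--
--     # Strategy 1: x runs over the divisors of n, y searched in [x, 4*n)
--     for x in range(1, n + 1):
--         if n % x == 0:
--             hit = _best_pair(4 * x - n, n * x, x, 4 * n, divs_n, x)
--             if hit is not None:
--                 return (x,) + hit
--
--     # Strategy 2: all x in (n//4, n], y searched in [x, min(10*n, x + 10000))
--     for x in range(n // 4 + 1, n + 1):
--         hit = _best_pair(4 * x - n, n * x, x, min(10 * n, x + 10000), divs_n, x)
--         if hit is not None: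
--             return (x,) + hit
--
--     return None
--
--
-- def _divisors(m):
--     """All positive divisors of m (m >= 1), by trial division up to sqrt(m)."""
--     divs = []
--     i = 1
--     while i * i <= m:
--         if m % i == 0:
--             divs.append(i)
--             divs.append(m // i)
--         i += 1
--     return divs
--
--
-- def _best_pair(num, denom, ylo, yhi, divs_n, x):
--     """Smallest-y solution of num/denom = 1/y + 1/z with ylo <= y <= z and
--     y < yhi, or None (denom = n*x, divs_n = divisors of n).  Writing
--     a = num*y - denom, the identity forces a | denom**2 with
--     num*z - denom = denom**2 // a; y and z are integers iff num divides
--     a + denom and denom**2 // a + denom."""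
--     if num <= 0:
--         return None
--     sq = denom * denom
--     xdivs = _divisors(x)
--     divs = sorted({dn * dx for dn in divs_n for dx in xdivs})
--     ub = min(denom, num * yhi - denom - 1)  # a <= denom (z >= y) and y < yhi
--     cand = []
--     for d1 in divs:
--         for d2 in divs:
--             a = d1 * d2
--             if a > ub:
--                 break
--             if ((a + denom) % num == 0 and (sq // a + denom) % num == 0
--                     and num * ylo <= a + denom):
--                 cand.append(a)
--     if not cand:
--         return None
--     a = min(cand)
--     return ((a + denom) // num, (sq // a + denom) // num)
-- ===== Notes on version B (the rewrite author's own statement) =====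
-- stated objective: alternative
-- what changed: The inner linear scan over y is replaced by a closed-form solve: using (num*y-denom)*(num*z-denom)=denom^2, B enumerates the divisors of denom^2 (as products of two divisors of denom=n*x, built from divisors of n computed once and divisors of x) and takes the smallest admissible one instead of scanning every y.
import Mathlib
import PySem

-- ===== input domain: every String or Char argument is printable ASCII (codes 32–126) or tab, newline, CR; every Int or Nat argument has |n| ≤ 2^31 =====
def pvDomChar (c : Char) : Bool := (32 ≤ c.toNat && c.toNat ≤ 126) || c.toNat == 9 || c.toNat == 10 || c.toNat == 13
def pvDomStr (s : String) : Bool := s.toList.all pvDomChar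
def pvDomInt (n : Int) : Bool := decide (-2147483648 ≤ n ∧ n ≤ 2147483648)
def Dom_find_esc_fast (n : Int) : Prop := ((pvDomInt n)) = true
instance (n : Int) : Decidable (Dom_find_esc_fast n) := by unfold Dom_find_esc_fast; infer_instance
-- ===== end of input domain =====

-- B replaces A's linear scan over y by enumerating the divisors a of denom² (as products of
-- two divisors of denom = n*x) via the identity (num*y - denom)*(num*z - denom) = denom² and
-- taking the smallest admissible a; objective: alternative algorithm.

-- ===== PORT A =====
def pyVerify (n x y z : Int) : Bool := 4 * x * y * z == n * (y * z + x * z + x * y)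

def escInner (n x num denom : Int) : List Int → Option (List Int)
  | [] => none
  | y :: ys =>
      let d := num * y - denom
      if 0 < d ∧ PySem.Int.mod (denom * y) d = 0 then
        let z := PySem.Int.floordiv (denom * y) d
        if y ≤ z ∧ pyVerify n x y z = true then some [x, y, z]
        else escInner n x num denom ys
      else escInner n x num denom ys

def find_esc_fast (n : Int) : Option (List Int) :=
  match (PySem.List.pyRange 1 (n + 1) 1).findSome? (fun x =>
      if PySem.Int.mod n x = 0 then
        let num := 4 * x - n
        if num ≤ 0 then none
        else escInner n x num (n * x) (PySem.List.pyRange x (4 * n) 1)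
      else none) with
  | some r => some r
  | none =>
      (PySem.List.pyRange (PySem.Int.floordiv n 4 + 1) (n + 1) 1).findSome? (fun x =>
        let num := 4 * x - n
        if num ≤ 0 then none
        else escInner n x num (n * x) (PySem.List.pyRange x (min (10 * n) (x + 10000)) 1))

-- ===== PORT B =====
-- while i*i <= m: collect i and m//i when i divides m
def divLoop (m i : Int) (acc : List Int) : List Int :=
  if h : i * i ≤ m then
    (if PySem.Int.mod m i = 0 then divLoop m (i + 1) (acc ++ [i, PySem.Int.floordiv m i])
     else divLoop m (i + 1) acc)
  else acc
termination_by (m + 1 - i).toNat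
decreasing_by
  all_goals
    (have hi : i ≤ m := by
       by_cases h0 : i ≤ 0
       · nlinarith
       · nlinarith
     omega)

def pyDivisors (m : Int) : List Int := divLoop m 1 []

def bestPair (num denom ylo yhi : Int) (divs_n : List Int) (x : Int) : Option (Int × Int) :=
  if num ≤ 0 then none
  else
    let sq := denom * denom
    let xdivs := pyDivisors x
    let divs := PySem.List.sorted
      (PySem.Set.ofList (divs_n.flatMap (fun dn => xdivs.map (fun dx => dn * dx))))
      (fun a => a) false
    let ub := min denom (num * yhi - denom - 1)
    let cand := divs.flatMap (fun d1 =>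
      (divs.takeWhile (fun d2 => decide (d1 * d2 ≤ ub))).filterMap (fun d2 =>
        if PySem.Int.mod (d1 * d2 + denom) num = 0 ∧
           PySem.Int.mod (PySem.Int.floordiv sq (d1 * d2) + denom) num = 0 ∧
           num * ylo ≤ d1 * d2 + denom
        then some (d1 * d2) else none))
    match PySem.List.min? cand (fun a => a) with
    | none => none
    | some a => some (PySem.Int.floordiv (a + denom) num,
                      PySem.Int.floordiv (PySem.Int.floordiv sq a + denom) num)

def find_esc_fast_alt (n : Int) : Option (List Int) :=
  let divs_n := pyDivisors n
  match (PySem.List.pyRange 1 (n + 1) 1).findSome? (fun x =>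
      if PySem.Int.mod n x = 0 then
        (bestPair (4 * x - n) (n * x) x (4 * n) divs_n x).map (fun p => [x, p.1, p.2])
      else none) with
  | some r => some r
  | none =>
      (PySem.List.pyRange (PySem.Int.floordiv n 4 + 1) (n + 1) 1).findSome? (fun x =>
        (bestPair (4 * x - n) (n * x) x (min (10 * n) (x + 10000)) divs_n x).map
          (fun p => [x, p.1, p.2]))

-- ===== PRECONDITION & SPEC =====
def Spec_find_esc_fast (n : Int) (out : Option (List Int)) : Prop := out = find_esc_fast_alt n
instance (n : Int) (out : Option (List Int)) : Decidable (Spec_find_esc_fast n out) := by unfold Spec_find_esc_fast; infer_instance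

-- ===== CLAIM (what is proved, stated in full; the proofs are below) =====
def Claim_equal_find_esc_fast : Prop := ∀ (n : Int), Dom_find_esc_fast n → Spec_find_esc_fast n (find_esc_fast n)

-- ===== LEMMAS AND PROOFS =====

-- the condition A's inner scan tests at y (verify() is implied, see verify_auto)
def CondA (num denom y : Int) : Prop :=
  0 < num * y - denom ∧ (num * y - denom) ∣ denom * y ∧ y ≤ (denom * y) / (num * y - denom)

-- the condition B tests on a candidate divisor a of denom², including list membership facts
def QB (num denom ylo yhi a : Int) : Prop :=
  1 ≤ a ∧ a ∣ denom * denom ∧ a ≤ denom ∧ num ∣ (a + denom) ∧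
  num ∣ ((denom * denom) / a + denom) ∧ num * ylo ≤ a + denom ∧ a + denom < num * yhi

lemma verify_auto (n x y z d : Int) (hz : z * d = (n * x) * y) (hnum : d = (4 * x - n) * y - n * x) :
    pyVerify n x y z = true := by
  subst hnum
  simp only [pyVerify, beq_iff_eq]
  linear_combination hz

lemma escInner_cons (n x num denom y : Int) (ys : List Int) :
    escInner n x num denom (y :: ys) =
      if 0 < num * y - denom ∧ PySem.Int.mod (denom * y) (num * y - denom) = 0 then
        (if y ≤ PySem.Int.floordiv (denom * y) (num * y - denom) ∧
            pyVerify n x y (PySem.Int.floordiv (denom * y) (num * y - denom)) = true then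
          some [x, y, PySem.Int.floordiv (denom * y) (num * y - denom)]
        else escInner n x num denom ys)
      else escInner n x num denom ys := rfl

-- A's scan with all-failing condition returns none
lemma escInner_none (n x num denom : Int)
    (l : List Int) (h : ∀ y ∈ l, ¬ CondA num denom y) :
    escInner n x num denom l = none := by
  induction l with
  | nil => rfl
  | cons y ys ih =>
    have hy := h y (List.mem_cons_self)
    have hrest : ∀ y' ∈ ys, ¬ CondA num denom y' := fun y' hy' => h y' (List.mem_cons_of_mem _ hy')
    rw [escInner_cons]
    by_cases h1 : 0 < num * y - denom ∧ PySem.Int.mod (denom * y) (num * y - denom) = 0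
    · have hdvd : (num * y - denom) ∣ denom * y := (PySem.Int.mod_eq_zero_iff_dvd _ _).mp h1.2
      have hz : PySem.Int.floordiv (denom * y) (num * y - denom) =
          (denom * y) / (num * y - denom) := PySem.Int.floordiv_eq_ediv_of_pos h1.1
      rw [if_pos h1, if_neg, ih hrest]
      intro hc
      exact hy ⟨h1.1, hdvd, by rw [← hz]; exact hc.1⟩
    · rw [if_neg h1]
      exact ih hrest

-- A's scan returns the first y satisfying CondA
lemma escInner_first (n x num denom : Int) (hnd : num = 4 * x - n) (hdd : denom = n * x)
    (y0 yhi : Int) (hcond : CondA num denom y0) (hy0 : y0 < yhi) :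
    ∀ lo, lo ≤ y0 → (∀ y, lo ≤ y → y < y0 → ¬ CondA num denom y) →
      escInner n x num denom (PySem.List.pyRange lo yhi 1) =
        some [x, y0, (denom * y0) / (num * y0 - denom)] := by
  intro lo hlo hfail
  obtain ⟨h1, h2, h3⟩ := hcond
  generalize hk : (y0 - lo).toNat = k
  induction k generalizing lo with
  | zero =>
    have hle : lo = y0 := by omega
    subst hle
    rw [PySem.List.pyRange_one_cons hy0, escInner_cons]
    have hz : PySem.Int.floordiv (denom * lo) (num * lo - denom) =
        (denom * lo) / (num * lo - denom) := PySem.Int.floordiv_eq_ediv_of_pos h1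
    rw [if_pos ⟨h1, (PySem.Int.mod_eq_zero_iff_dvd _ _).mpr h2⟩, if_pos, hz]
    constructor
    · rw [hz]; exact h3
    · exact verify_auto n x lo _ (num * lo - denom)
        (by rw [hz, ← hdd]; exact Int.ediv_mul_cancel h2) (by rw [hnd, hdd])
  | succ k ih =>
    have hlt : lo < y0 := by omega
    rw [PySem.List.pyRange_one_cons (by omega), escInner_cons]
    have hnc := hfail lo le_rfl hlt
    have hrec : escInner n x num denom (PySem.List.pyRange (lo + 1) yhi 1) =
        some [x, y0, denom * y0 / (num * y0 - denom)] :=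
      ih (lo + 1) (by omega) (fun y hy hy' => hfail y (by omega) hy') (by omega)
    by_cases hc1 : 0 < num * lo - denom ∧ PySem.Int.mod (denom * lo) (num * lo - denom) = 0
    · have hdvd : (num * lo - denom) ∣ denom * lo := (PySem.Int.mod_eq_zero_iff_dvd _ _).mp hc1.2
      have hz : PySem.Int.floordiv (denom * lo) (num * lo - denom) =
          (denom * lo) / (num * lo - denom) := PySem.Int.floordiv_eq_ediv_of_pos hc1.1
      rw [if_pos hc1, if_neg, hrec]
      intro hc
      exact hnc ⟨hc1.1, hdvd, by rw [← hz]; exact hc.1⟩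
    · rw [if_neg hc1]
      exact hrec

lemma divLoop_mem (m i : Int) (acc : List Int) (d : Int) (hi : 1 ≤ i) :
    d ∈ divLoop m i acc ↔
      d ∈ acc ∨ ∃ j, i ≤ j ∧ j * j ≤ m ∧ PySem.Int.mod m j = 0 ∧
        (d = j ∨ d = PySem.Int.floordiv m j) := by
  fun_induction divLoop m i acc with
  | case1 i acc hle hmod ih =>
    rw [ih (by omega)]
    simp only [List.mem_append, List.mem_cons, List.not_mem_nil, or_false]
    constructor
    · rintro (⟨hd | hd | hd⟩ | ⟨j, hj1, hj2, hj3, hj4⟩)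
      · exact Or.inl hd
      · exact Or.inr ⟨i, le_rfl, hle, hmod, Or.inl hd⟩
      · exact Or.inr ⟨i, le_rfl, hle, hmod, Or.inr hd⟩
      · exact Or.inr ⟨j, by omega, hj2, hj3, hj4⟩
    · rintro (hd | ⟨j, hj1, hj2, hj3, hj4⟩)
      · exact Or.inl (Or.inl hd)
      · rcases eq_or_lt_of_le hj1 with rfl | hlt
        · rcases hj4 with hd | hd
          · exact Or.inl (Or.inr (Or.inl hd))
          · exact Or.inl (Or.inr (Or.inr hd))
        · exact Or.inr ⟨j, by omega, hj2, hj3, hj4⟩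
  | case2 i acc hle hmod ih =>
    rw [ih (by omega)]
    constructor
    · rintro (hd | ⟨j, hj1, hj2, hj3, hj4⟩)
      · exact Or.inl hd
      · exact Or.inr ⟨j, by omega, hj2, hj3, hj4⟩
    · rintro (hd | ⟨j, hj1, hj2, hj3, hj4⟩)
      · exact Or.inl hd
      · rcases eq_or_lt_of_le hj1 with rfl | hlt
        · exact absurd hj3 hmod
        · exact Or.inr ⟨j, by omega, hj2, hj3, hj4⟩
  | case3 i acc hle =>
    constructor
    · exact Or.inl
    · rintro (hd | ⟨j, hj1, hj2, hj3, hj4⟩)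
      · exact hd
      · exact absurd hj2 (by nlinarith)

-- divisor list spec
lemma mem_pyDivisors (m d : Int) (hm : 1 ≤ m) : d ∈ pyDivisors m ↔ 1 ≤ d ∧ d ∣ m := by
  rw [pyDivisors, divLoop_mem m 1 [] d le_rfl]
  simp only [List.not_mem_nil, false_or]
  constructor
  · rintro ⟨j, hj1, hj2, hj3, hj4⟩
    have hjd : j ∣ m := (PySem.Int.mod_eq_zero_iff_dvd _ _).mp hj3
    obtain ⟨c, hc⟩ := hjd
    have hc1 : 1 ≤ c := by nlinarith
    have hfd : PySem.Int.floordiv m j = c := by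
      rw [PySem.Int.floordiv_eq_ediv_of_pos (by omega), hc, Int.mul_ediv_cancel_left c (by omega)]
    rcases hj4 with rfl | rfl
    · exact ⟨hj1, ⟨c, hc⟩⟩
    · rw [hfd]
      exact ⟨hc1, ⟨j, by rw [hc]; ring⟩⟩
  · rintro ⟨hd1, c, hc⟩
    have hc1 : 1 ≤ c := by nlinarith
    by_cases hsq : d * d ≤ m
    · exact ⟨d, hd1, hsq, (PySem.Int.mod_eq_zero_iff_dvd _ _).mpr ⟨c, hc⟩, Or.inl rfl⟩
    · refine ⟨c, hc1, by nlinarith, (PySem.Int.mod_eq_zero_iff_dvd _ _).mpr ⟨d, by rw [hc]; ring⟩, Or.inr ?_⟩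
      rw [PySem.Int.floordiv_eq_ediv_of_pos (by omega), hc,
        show d * c = c * d by ring, Int.mul_ediv_cancel_left d (by omega : c ≠ 0)]

-- every divisor of m1*m2 is a product of a divisor of m1 and a divisor of m2
lemma dvd_mul_split (m1 m2 a : Int) (h1 : 1 ≤ m1) (h2 : 1 ≤ m2) (ha : 1 ≤ a)
    (hdvd : a ∣ m1 * m2) :
    ∃ d1 d2, (1 ≤ d1 ∧ d1 ∣ m1) ∧ (1 ≤ d2 ∧ d2 ∣ m2) ∧ a = d1 * d2 := by
  have hca : (a.toNat : Int) = a := Int.toNat_of_nonneg (by omega)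
  have hc1 : (m1.toNat : Int) = m1 := Int.toNat_of_nonneg (by omega)
  have hc2 : (m2.toNat : Int) = m2 := Int.toNat_of_nonneg (by omega)
  have hnat : a.toNat ∣ m1.toNat * m2.toNat := by
    rw [← Int.natCast_dvd_natCast]
    push_cast [hca, hc1, hc2]
    exact hdvd
  obtain ⟨m', n', hm', hn', hmn⟩ := Nat.dvd_mul.mp hnat
  have hane : 1 ≤ a.toNat := by omega
  have hm0 : 1 ≤ m' := by
    rcases Nat.eq_zero_or_pos m' with h0 | h0
    · subst h0; simp at hmn; omega
    · exact h0
  have hn0 : 1 ≤ n' := by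
    rcases Nat.eq_zero_or_pos n' with h0 | h0
    · subst h0; simp at hmn; omega
    · exact h0
  refine ⟨(m' : Int), (n' : Int), ⟨by exact_mod_cast hm0, ?_⟩, ⟨by exact_mod_cast hn0, ?_⟩, ?_⟩
  · rw [← hc1]; exact_mod_cast hm'
  · rw [← hc2]; exact_mod_cast hn'
  · rw [← hca]; exact_mod_cast hmn.symm

-- break on a sorted inner list = a membership filter
lemma mem_takeWhile_sorted (l : List Int) (d1 ub d2 : Int) (hp : l.Pairwise (· ≤ ·))
    (hd1 : 1 ≤ d1) :
    d2 ∈ l.takeWhile (fun t => decide (d1 * t ≤ ub)) ↔ d2 ∈ l ∧ d1 * d2 ≤ ub := by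
  induction l with
  | nil => simp
  | cons hd t ih =>
    rw [List.pairwise_cons] at hp
    by_cases hh : d1 * hd ≤ ub
    · rw [List.takeWhile_cons_of_pos (by simpa using hh)]
      simp only [List.mem_cons, ih hp.2]
      constructor
      · rintro (rfl | ⟨hm, hle⟩)
        · exact ⟨Or.inl rfl, hh⟩
        · exact ⟨Or.inr hm, hle⟩
      · rintro ⟨rfl | hm, hle⟩
        · exact Or.inl rfl
        · exact Or.inr ⟨hm, hle⟩
    · rw [List.takeWhile_cons_of_neg (by simpa using hh)]
      simp only [List.not_mem_nil, false_iff, List.mem_cons]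
      rintro ⟨rfl | hm, hle⟩
      · exact hh hle
      · exact hh (by nlinarith [hp.1 d2 hm])

-- CondA at y gives QB at a = num*y - denom
lemma condA_to_QB (num denom ylo yhi y : Int) (hnum : 0 < num) (hden : 0 < denom)
    (hylo : ylo ≤ y) (hyhi : y < yhi) (h : CondA num denom y) :
    QB num denom ylo yhi (num * y - denom) := by
  obtain ⟨h1, h2, h3⟩ := h
  have hy1 : 1 ≤ y := by nlinarith
  have hz : (denom * y) / (num * y - denom) * (num * y - denom) = denom * y :=
    Int.ediv_mul_cancel h2
  set zv := (denom * y) / (num * y - denom) with hzv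
  have hsq : denom * denom = (num * y - denom) * (num * zv - denom) := by
    linear_combination (-num) * hz
  have hqa : (denom * denom) / (num * y - denom) = num * zv - denom := by
    rw [hsq, Int.mul_ediv_cancel_left _ (by omega : num * y - denom ≠ 0)]
  refine ⟨by omega, ⟨num * zv - denom, hsq⟩, by nlinarith, ⟨y, by ring⟩,
    ⟨zv, by rw [hqa]; ring⟩, by nlinarith, by nlinarith⟩

-- QB at a gives CondA at y = (a+denom)/num, with matching z
lemma QB_to_condA (num denom ylo yhi a : Int) (hnum : 0 < num) (hden : 0 < denom)
    (h : QB num denom ylo yhi a) :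
    num * ((a + denom) / num) = a + denom ∧ ylo ≤ (a + denom) / num ∧ (a + denom) / num < yhi ∧
    CondA num denom ((a + denom) / num) ∧
    (denom * ((a + denom) / num)) / a = ((denom * denom) / a + denom) / num := by
  obtain ⟨h1, h2, h3, h4, h5, h6, h7⟩ := h
  obtain ⟨t, ht⟩ := h4
  have hy : (a + denom) / num = t := by
    rw [ht, Int.mul_ediv_cancel_left _ (by omega : num ≠ 0)]
  have hnumy : num * ((a + denom) / num) = a + denom := by rw [hy, ← ht]
  obtain ⟨s, hs⟩ := h5
  have hq : a * ((denom * denom) / a) = denom * denom := Int.mul_ediv_cancel' h2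
  set q := (denom * denom) / a with hqdef
  have haq : a ≤ q := by nlinarith
  have hsa : denom * ((a + denom) / num) = a * s := by
    have hcancel : num * (denom * ((a + denom) / num)) = num * (a * s) := by
      calc num * (denom * ((a + denom) / num)) = denom * (num * ((a + denom) / num)) := by ring
        _ = denom * (a + denom) := by rw [hnumy]
        _ = a * (q + denom) := by linear_combination -hq
        _ = a * (num * s) := by rw [← hs]
        _ = num * (a * s) := by ring
    exact mul_left_cancel₀ (by omega : num ≠ 0) hcancel
  have hzs : (denom * ((a + denom) / num)) / a = s := by
    rw [hsa, Int.mul_ediv_cancel_left _ (by omega : a ≠ 0)]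
  have hys : (a + denom) / num ≤ s := by
    have : num * ((a + denom) / num) ≤ num * s := by rw [hnumy, ← hs]; omega
    exact le_of_mul_le_mul_left this (by omega)
  have hd : num * ((a + denom) / num) - denom = a := by omega
  refine ⟨hnumy, ?_, ?_, ⟨by omega, by rw [hd]; exact ⟨s, hsa⟩, by rw [hd, hzs]; exact hys⟩, ?_⟩
  · exact le_of_mul_le_mul_left (by omega : num * ylo ≤ num * ((a + denom) / num)) (by omega)
  · exact lt_of_mul_lt_mul_left (by omega : num * ((a + denom) / num) < num * yhi) (by omega)
  · rw [hzs, hs, Int.mul_ediv_cancel_left _ (by omega : num ≠ 0)]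

-- the per-x equivalence of the two inner searches
lemma inner_eq (n x yhi : Int) (hn : 1 ≤ n) (hx : 1 ≤ x) (hnum : 0 < 4 * x - n) :
    escInner n x (4 * x - n) (n * x) (PySem.List.pyRange x yhi 1) =
      (bestPair (4 * x - n) (n * x) x yhi (pyDivisors n) x).map (fun p => [x, p.1, p.2]) := by
  have hden : 0 < n * x := by positivity
  set num := 4 * x - n with hnumdef
  set denom := n * x with hdenomdef
  set divs := PySem.List.sorted
      (PySem.Set.ofList ((pyDivisors n).flatMap (fun dn => (pyDivisors x).map (fun dx => dn * dx))))
      (fun a => a) false with hdivsdef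
  set ub := min denom (num * yhi - denom - 1) with hubdef
  set cand := divs.flatMap (fun d1 =>
      (divs.takeWhile (fun d2 => decide (d1 * d2 ≤ ub))).filterMap (fun d2 =>
        if PySem.Int.mod (d1 * d2 + denom) num = 0 ∧
           PySem.Int.mod (PySem.Int.floordiv (denom * denom) (d1 * d2) + denom) num = 0 ∧
           num * x ≤ d1 * d2 + denom
        then some (d1 * d2) else none)) with hcanddef
  have hbp : bestPair num denom x yhi (pyDivisors n) x =
      match PySem.List.min? cand (fun a => a) with
      | none => none
      | some a => some (PySem.Int.floordiv (a + denom) num,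
                        PySem.Int.floordiv (PySem.Int.floordiv (denom * denom) a + denom) num) := by
    rw [bestPair, if_neg (by omega)]
  have hmemdivs : ∀ d, d ∈ divs ↔ 1 ≤ d ∧ d ∣ denom := by
    intro d
    rw [hdivsdef, PySem.List.mem_sorted, PySem.Set.mem_ofList, List.mem_flatMap]
    constructor
    · rintro ⟨dn, hdn, hmap⟩
      rw [List.mem_map] at hmap
      obtain ⟨dx, hdx, rfl⟩ := hmap
      obtain ⟨hdn1, hdn2⟩ := (mem_pyDivisors n dn hn).mp hdn
      obtain ⟨hdx1, hdx2⟩ := (mem_pyDivisors x dx hx).mp hdx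
      exact ⟨by nlinarith, mul_dvd_mul hdn2 hdx2⟩
    · rintro ⟨hd1, hd2⟩
      obtain ⟨dn, dx, ⟨hdn1, hdn2⟩, ⟨hdx1, hdx2⟩, rfl⟩ := dvd_mul_split n x d hn hx hd1 hd2
      exact ⟨dn, (mem_pyDivisors n dn hn).mpr ⟨hdn1, hdn2⟩,
        List.mem_map.mpr ⟨dx, (mem_pyDivisors x dx hx).mpr ⟨hdx1, hdx2⟩, rfl⟩⟩
  have hpair : divs.Pairwise (· ≤ ·) :=
    (PySem.List.sorted_ofList_pairwise_lt _).imp (fun h => le_of_lt h)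
  have hcand : ∀ a, a ∈ cand ↔ QB num denom x yhi a := by
    intro a
    rw [hcanddef]
    simp only [List.mem_flatMap, List.mem_filterMap, Option.ite_none_right_eq_some,
      Option.some.injEq]
    constructor
    · rintro ⟨d1, hd1, d2, hd2tw, ⟨hg1, hg2, hg3⟩, rfl⟩
      obtain ⟨hd1a, hd1b⟩ := (hmemdivs d1).mp hd1
      obtain ⟨hd2m, hub⟩ := (mem_takeWhile_sorted divs d1 ub d2 hpair hd1a).mp hd2tw
      obtain ⟨hd2a, hd2b⟩ := (hmemdivs d2).mp hd2m
      have ha1 : 1 ≤ d1 * d2 := by nlinarith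
      refine ⟨ha1, mul_dvd_mul hd1b hd2b, by omega, (PySem.Int.mod_eq_zero_iff_dvd _ _).mp hg1,
        ?_, hg3, by omega⟩
      rw [← PySem.Int.floordiv_eq_ediv_of_pos (by omega : (0:Int) < d1 * d2)]
      exact (PySem.Int.mod_eq_zero_iff_dvd _ _).mp hg2
    · rintro ⟨h1, h2, h3, h4, h5, h6, h7⟩
      obtain ⟨d1, d2, ⟨hd1a, hd1b⟩, ⟨hd2a, hd2b⟩, rfl⟩ :=
        dvd_mul_split denom denom a (by omega) (by omega) h1 h2
      refine ⟨d1, (hmemdivs d1).mpr ⟨hd1a, hd1b⟩,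
        d2, (mem_takeWhile_sorted divs d1 ub d2 hpair hd1a).mpr
          ⟨(hmemdivs d2).mpr ⟨hd2a, hd2b⟩, by omega⟩,
        ⟨(PySem.Int.mod_eq_zero_iff_dvd _ _).mpr h4, ?_, h6⟩, rfl⟩
      rw [PySem.Int.floordiv_eq_ediv_of_pos (by nlinarith : (0:Int) < d1 * d2)]
      exact (PySem.Int.mod_eq_zero_iff_dvd _ _).mpr h5
  rcases hmin : PySem.List.min? cand (fun a => a) with _ | a0
  · -- no candidate: no y satisfies CondA
    have hnone : ∀ a, ¬ a ∈ cand := by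
      rw [PySem.List.min?_eq_none_iff] at hmin
      simp [hmin]
    rw [hbp, hmin, Option.map_none]
    apply escInner_none
    intro y hy hcA
    rw [PySem.List.mem_pyRange_one] at hy
    exact hnone _ ((hcand _).mpr (condA_to_QB num denom x yhi y hnum hden hy.1 hy.2 hcA))
  · have ha0 := (hcand a0).mp (PySem.List.min?_mem hmin)
    have hmin' : ∀ b ∈ cand, a0 ≤ b := PySem.List.min?_isMin hmin
    obtain ⟨hnumy, hylo, hyhi', hcA, hzeq⟩ := QB_to_condA num denom x yhi a0 hnum hden ha0
    set y0 := (a0 + denom) / num with hy0def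
    have hfirst : ∀ y, x ≤ y → y < y0 → ¬ CondA num denom y := by
      intro y hy1 hy2 hcAy
      have hq := condA_to_QB num denom x yhi y hnum hden hy1 (by omega) hcAy
      have := hmin' _ ((hcand _).mpr hq)
      nlinarith [mul_pos hnum (by omega : (0:Int) < y0 - y)]
    rw [hbp, hmin]
    rw [escInner_first n x num denom hnumdef hdenomdef y0 yhi hcA hyhi' x hylo hfirst]
    simp only [Option.map_some]
    have hfd1 : PySem.Int.floordiv (a0 + denom) num = y0 :=
      PySem.Int.floordiv_eq_ediv_of_pos hnum
    have hfd2 : PySem.Int.floordiv (denom * denom) a0 = (denom * denom) / a0 :=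
      PySem.Int.floordiv_eq_ediv_of_pos (by linarith [ha0.1])
    have hfd3 : PySem.Int.floordiv ((denom * denom) / a0 + denom) num =
        ((denom * denom) / a0 + denom) / num := PySem.Int.floordiv_eq_ediv_of_pos hnum
    have hda : num * y0 - denom = a0 := by linarith [hnumy]
    rw [hfd1, hfd2, hfd3, hda, hzeq]

lemma findSome?_congr {α β : Type} (l : List α) (f g : α → Option β)
    (h : ∀ x ∈ l, f x = g x) : l.findSome? f = l.findSome? g := by
  induction l with
  | nil => rfl
  | cons a t ih =>
      simp only [List.findSome?_cons, h a (by simp)]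
      cases g a <;> simp [ih fun x hx => h x (by simp [hx])]

-- ===== VERDICT (by name: the statement is the Claim_ definition above) =====
theorem find_esc_fast_spec : Claim_equal_find_esc_fast := by
  intro n _
  unfold Spec_find_esc_fast
  unfold find_esc_fast find_esc_fast_alt
  by_cases hn : 1 ≤ n
  · have h1 : ∀ x ∈ PySem.List.pyRange 1 (n + 1) 1,
        (if PySem.Int.mod n x = 0 then
          let num := 4 * x - n
          if num ≤ 0 then none
          else escInner n x num (n * x) (PySem.List.pyRange x (4 * n) 1)
        else none) =
        (if PySem.Int.mod n x = 0 then
          (bestPair (4 * x - n) (n * x) x (4 * n) (pyDivisors n) x).map (fun p => [x, p.1, p.2])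
        else none) := by
      intro x hx
      rw [PySem.List.mem_pyRange_one] at hx
      by_cases hm : PySem.Int.mod n x = 0
      · rw [if_pos hm, if_pos hm]
        by_cases hnm : 4 * x - n ≤ 0
        · simp only [if_pos hnm]
          rw [bestPair, if_pos hnm, Option.map_none]
        · simp only [if_neg hnm]
          exact inner_eq n x (4 * n) hn (by omega) (by omega)
      · rw [if_neg hm, if_neg hm]
    have h2 : ∀ x ∈ PySem.List.pyRange (PySem.Int.floordiv n 4 + 1) (n + 1) 1,
        (let num := 4 * x - n
         if num ≤ 0 then none
         else escInner n x num (n * x) (PySem.List.pyRange x (min (10 * n) (x + 10000)) 1)) =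
        (bestPair (4 * x - n) (n * x) x (min (10 * n) (x + 10000)) (pyDivisors n) x).map (fun p => [x, p.1, p.2]) := by
      intro x hx
      rw [PySem.List.mem_pyRange_one] at hx
      have hfd : PySem.Int.floordiv n 4 = n / 4 := PySem.Int.floordiv_eq_ediv_of_pos (by norm_num)
      rw [hfd] at hx
      by_cases hnm : 4 * x - n ≤ 0
      · simp only [if_pos hnm]
        rw [bestPair, if_pos hnm, Option.map_none]
      · simp only [if_neg hnm]
        exact inner_eq n x (min (10 * n) (x + 10000)) hn (by omega) (by omega)
    rw [findSome?_congr _ _ _ h1, findSome?_congr _ _ _ h2]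
  · have hfd : PySem.Int.floordiv n 4 = n / 4 := PySem.Int.floordiv_eq_ediv_of_pos (by norm_num)
    rw [PySem.List.pyRange_one_eq_nil (by omega : n + 1 ≤ 1), hfd,
      PySem.List.pyRange_one_eq_nil (by omega : n + 1 ≤ n / 4 + 1)]
    rfl
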